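-- pv_equiv track=rewrite | github.com/abcsFrederick/pyrkit | src/lint.py | _remove_trailing_nan
-- ===== SOURCE A (Python) =====
-- def _remove_trailing_nan(linelist):
--     """Private function to clean project_value_list. Removes trailing nan's which
--     are empty sub-project cells. As an example, input ["nan", 1, 2, "nan", "nan"]
--     will return ["nan", 1, 2].
--     """
--     clean = linelist
--     # Looping through reversed list to get trailing values
--     for field in linelist[::-1]:
--         # skip over over empty lines or nan values
--         if not field or field == 'nan':
--             removed = clean.pop()
--         else:
--             break # break when encountering first non-empty string or non-nan
--
--     return clean
-- ===== SOURCE B (Python) =====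
-- def _remove_trailing_nan(linelist):
--     """Forward one-pass rewrite: remember the index just past the last real
--     (non-empty, non-'nan') field, then delete everything after it in place."""
--     keep = 0
--     for i, field in enumerate(linelist):
--         if field and field != 'nan':
--             keep = i + 1
--     del linelist[keep:]
--     return linelist
-- ===== Notes on version B (the rewrite author's own statement) =====
-- stated objective: alternative
-- what changed: Replaces A's backward iteration over a reversed copy with pop() per trailing junk element by a single forward scan that records the index past the last real field and one slice deletion; in-place mutation and the returned object are preserved.
import Mathlib
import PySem

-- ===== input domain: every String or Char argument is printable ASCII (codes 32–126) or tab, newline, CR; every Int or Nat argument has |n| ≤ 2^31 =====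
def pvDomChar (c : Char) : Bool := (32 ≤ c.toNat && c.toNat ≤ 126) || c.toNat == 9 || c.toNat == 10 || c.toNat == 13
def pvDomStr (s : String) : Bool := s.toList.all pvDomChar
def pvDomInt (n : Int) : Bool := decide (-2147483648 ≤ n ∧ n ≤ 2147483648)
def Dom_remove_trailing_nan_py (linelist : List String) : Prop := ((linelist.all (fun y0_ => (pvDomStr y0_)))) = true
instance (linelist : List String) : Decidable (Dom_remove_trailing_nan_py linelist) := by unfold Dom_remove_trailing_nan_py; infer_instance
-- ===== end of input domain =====

-- B replaces the reversed-copy-and-pop loop by one forward scan that records the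
-- index past the last real field and a single truncation (alternative decomposition;
-- return-value equivalence proved here; both Pythons mutate linelist to the same state).

-- ===== PORT A =====
-- the `for field in linelist[::-1]` loop body, popping from `clean`
def removeLoopA (rev : List String) (clean : List String) : List String :=
  match rev with
  | [] => clean
  | f :: rest =>
    if f = "" ∨ f = "nan" then
      match PySem.List.pop? clean with
      | some (_, c) => removeLoopA rest c
      | none => clean   -- unreachable: clean is nonempty whenever this pop runs (Python would raise)
    else clean

def remove_trailing_nan_py (linelist : List String) : List String :=
  removeLoopA ((PySem.List.slice? linelist none none (-1)).getD []) linelist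

-- ===== PORT B =====
def remove_trailing_nan_py_alt (linelist : List String) : List String :=
  let keep := (PySem.List.enumerate linelist 0).foldl
      (fun keep p => if p.2 ≠ "" ∧ p.2 ≠ "nan" then p.1 + 1 else keep) (0 : Int)
  linelist.take keep.toNat

-- ===== PRECONDITION & SPEC =====
def Spec_remove_trailing_nan_py (linelist : List String) (out : List String) : Prop := out = remove_trailing_nan_py_alt linelist
instance (linelist : List String) (out : List String) : Decidable (Spec_remove_trailing_nan_py linelist out) := by unfold Spec_remove_trailing_nan_py; infer_instance

-- ===== CLAIM (what is proved, stated in full; the proofs are below) =====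
def Claim_equal_remove_trailing_nan_py : Prop := ∀ (linelist : List String), Dom_remove_trailing_nan_py linelist → Spec_remove_trailing_nan_py linelist (remove_trailing_nan_py linelist)

-- ===== LEMMAS AND PROOFS =====

def pvJunk (f : String) : Bool := f == "" || f == "nan"

def pvK (l : List String) : Int :=
  (PySem.List.enumerate l 0).foldl
    (fun keep p => if p.2 ≠ "" ∧ p.2 ≠ "nan" then p.1 + 1 else keep) (0 : Int)

lemma removeLoopA_inv (rev : List String) :
    ∀ pre : List String,
      removeLoopA rev (pre ++ rev.reverse) = pre ++ (rev.dropWhile pvJunk).reverse := by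
  induction rev with
  | nil => intro pre; simp [removeLoopA]
  | cons f rest ih =>
    intro pre
    by_cases h : f = "" ∨ f = "nan"
    · have hr : pre ++ (f :: rest).reverse = (pre ++ rest.reverse) ++ [f] := by simp
      have hj : pvJunk f = true := by
        rcases h with h | h <;> simp [pvJunk, h]
      rw [hr]
      simp only [removeLoopA, if_pos h, PySem.List.pop?_last, List.dropWhile_cons, hj]
      exact ih pre
    · have hj : pvJunk f = false := by
        simp [pvJunk]; push_neg at h; exact ⟨h.1, h.2⟩
      simp [removeLoopA, if_neg h, List.dropWhile_cons, hj]

lemma pvK_spec (l : List String) :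
    0 ≤ pvK l ∧ pvK l ≤ l.length ∧
      l.take (pvK l).toNat = (l.reverse.dropWhile pvJunk).reverse := by
  induction l using List.reverseRecOn with
  | nil => simp [pvK, PySem.List.enumerate]
  | append_singleton l x ih =>
    obtain ⟨h0, hle, htake⟩ := ih
    have hK : pvK (l ++ [x]) =
        if x ≠ "" ∧ x ≠ "nan" then (l.length : Int) + 1 else pvK l := by
      simp [pvK, PySem.List.enumerate_append, PySem.List.enumerate_cons,
        PySem.List.enumerate_nil, List.foldl_append]
    by_cases hx : x ≠ "" ∧ x ≠ "nan"
    · have hj : pvJunk x = false := by simp [pvJunk]; exact ⟨hx.1, hx.2⟩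
      rw [hK, if_pos hx]
      refine ⟨by positivity, by simp, ?_⟩
      have : ((l.length : Int) + 1).toNat = l.length + 1 := by omega
      simp [this, List.reverse_append, hj,
        List.take_of_length_le (by simp : (l ++ [x]).length ≤ l.length + 1)]
    · have hj : pvJunk x = true := by
        simp [pvJunk]; by_contra hc; push_neg at hc; exact hx ⟨hc.1, hc.2⟩
      rw [hK, if_neg hx]
      refine ⟨h0, by simp; omega, ?_⟩
      have hlen : (pvK l).toNat ≤ l.length := by omega
      rw [List.take_append_of_le_length hlen]
      simp [List.reverse_append, hj, htake]

-- ===== VERDICT (by name: the statement is the Claim_ definition above) =====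
theorem remove_trailing_nan_py_spec : Claim_equal_remove_trailing_nan_py := by
  intro linelist _
  unfold Spec_remove_trailing_nan_py remove_trailing_nan_py remove_trailing_nan_py_alt
  rw [PySem.List.slice?_none_none_neg_one]
  have hA := removeLoopA_inv linelist.reverse []
  simp only [List.reverse_reverse, List.nil_append] at hA
  rw [Option.getD_some, hA]
  exact ((pvK_spec linelist).2.2).symm
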